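-- pv_equiv track=rewrite | github.com/KostarevVI/DB-course-2020-online-rpg | lab2_generator/main.py | amount_of_insert_and_updates_for_person
-- ===== SOURCE A (Python) =====
-- def amount_of_insert_and_updates_for_person(inventory_person_id, insert_list, update_list):
--     update_items_dictionary = {}
--     insert_items = 0
--     for element in update_list:
--         if element[2] == inventory_person_id:
--             if update_items_dictionary.get(element[3]) is not None:
--                 if update_items_dictionary[element[3]] < element[0]:
--                     update_items_dictionary[element[3]] = element[0]
--             else:
--                 update_items_dictionary[element[3]] = element[0]
--
--     for element in insert_list:
--         if element[0] == inventory_person_id and update_items_dictionary.get(element[1]) is None: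
--             insert_items += 1
--
--     total_amount = insert_items + sum(update_items_dictionary.values())
--     return total_amount
-- ===== SOURCE B (Python) =====
-- def amount_of_insert_and_updates_for_person(inventory_person_id, insert_list, update_list):
--     mine = [(row[3], row[0]) for row in update_list if row[2] == inventory_person_id]
--     keys = {k for k, _ in mine}
--     best = sum(max(v for k2, v in mine if k2 == k) for k in keys)
--     inserts = sum(1 for row in insert_list
--                   if row[0] == inventory_person_id and row[1] not in keys)
--     return inserts + best
-- ===== Notes on version B (the rewrite author's own statement) =====
-- stated objective: simpler
-- what changed: A threads a running-max dict while scanning update_list and tests dict membership for inserts; B separates concerns: it filters the matching (key,value) pairs once, takes the key set, computes sum of per-key maxima by a collect-then-reduce pass, and counts insert rows by set membership.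
import Mathlib
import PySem

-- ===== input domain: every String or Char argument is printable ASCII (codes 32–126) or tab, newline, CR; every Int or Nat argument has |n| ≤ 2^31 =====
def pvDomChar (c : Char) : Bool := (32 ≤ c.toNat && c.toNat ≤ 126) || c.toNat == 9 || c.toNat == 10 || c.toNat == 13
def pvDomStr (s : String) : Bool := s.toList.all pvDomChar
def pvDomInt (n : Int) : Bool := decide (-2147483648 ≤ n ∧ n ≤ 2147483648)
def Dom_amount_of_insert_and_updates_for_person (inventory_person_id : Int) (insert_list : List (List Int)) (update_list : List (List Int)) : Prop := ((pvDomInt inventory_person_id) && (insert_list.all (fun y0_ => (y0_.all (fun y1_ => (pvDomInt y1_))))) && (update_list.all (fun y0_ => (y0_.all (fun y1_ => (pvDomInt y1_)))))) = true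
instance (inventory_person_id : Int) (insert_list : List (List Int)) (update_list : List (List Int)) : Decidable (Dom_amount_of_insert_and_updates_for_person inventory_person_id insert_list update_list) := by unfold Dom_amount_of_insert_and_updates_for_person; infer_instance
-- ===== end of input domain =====

-- B replaces A's running-max dict threaded through one scan by a filter / key-set /
-- collect-then-reduce decomposition (objective: simpler); return values proved equal on Pre_.

-- ===== PORT A =====
def amount_of_insert_and_updates_for_person (inventory_person_id : Int) (insert_list : List (List Int)) (update_list : List (List Int)) : Int :=
  -- first loop: running-max dict keyed by element[3]
  let d : PySem.Dict Int Int := update_list.foldl (fun d row =>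
    if PySem.List.pyGetD row 2 0 = inventory_person_id then
      match d.get? (PySem.List.pyGetD row 3 0) with
      | some w =>
          if w < PySem.List.pyGetD row 0 0 then
            d.insert (PySem.List.pyGetD row 3 0) (PySem.List.pyGetD row 0 0)
          else d
      | none => d.insert (PySem.List.pyGetD row 3 0) (PySem.List.pyGetD row 0 0)
    else d) PySem.Dict.empty
  -- second loop: count inserts whose item key is absent from the dict
  let insert_items : Int := insert_list.foldl (fun c row =>
    if PySem.List.pyGetD row 0 0 = inventory_person_id ∧ (d.get? (PySem.List.pyGetD row 1 0)) = none
    then c + 1 else c) 0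
  insert_items + d.values.sum

-- ===== PORT B =====
def amount_of_insert_and_updates_for_person_alt (inventory_person_id : Int) (insert_list : List (List Int)) (update_list : List (List Int)) : Int :=
  -- mine = [(row[3], row[0]) for row in update_list if row[2] == inventory_person_id]
  let mine : List (Int × Int) :=
    (update_list.filter (fun row => PySem.List.pyGetD row 2 0 == inventory_person_id)).map
      (fun row => (PySem.List.pyGetD row 3 0, PySem.List.pyGetD row 0 0))
  -- keys = {k for k, _ in mine}
  let keys : PySem.Set Int := PySem.Set.ofList (mine.map (·.1))
  -- best = sum(max(v for k2, v in mine if k2 == k) for k in keys); every bucket is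
  -- nonempty for k ∈ keys, so Python's max never raises; .getD 0 is never reached
  let best : Int :=
    (keys.map (fun k => (((mine.filter (fun p => p.1 == k)).map (·.2)).max?).getD 0)).sum
  -- inserts = sum(1 for row in insert_list if row[0] == inventory_person_id and row[1] not in keys)
  let inserts : Int :=
    ((insert_list.filter (fun row =>
        PySem.List.pyGetD row 0 0 == inventory_person_id &&
        !(keys.contains (PySem.List.pyGetD row 1 0)))).length : Int)
  inserts + best

-- ===== PRECONDITION & SPEC =====
-- Pre_ excludes exactly the inputs on which Python A (and B) raises IndexError:
-- an update row shorter than 3, a matching update row shorter than 4, an insert row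
-- shorter than 1, or a matching insert row shorter than 2.
def Pre_amount_of_insert_and_updates_for_person (inventory_person_id : Int) (insert_list : List (List Int)) (update_list : List (List Int)) : Prop :=
  (∀ row ∈ update_list, 3 ≤ row.length ∧ (row.getD 2 0 = inventory_person_id → 4 ≤ row.length)) ∧
  (∀ row ∈ insert_list, 1 ≤ row.length ∧ (row.getD 0 0 = inventory_person_id → 2 ≤ row.length))
instance (inventory_person_id : Int) (insert_list : List (List Int)) (update_list : List (List Int)) : Decidable (Pre_amount_of_insert_and_updates_for_person inventory_person_id insert_list update_list) := by unfold Pre_amount_of_insert_and_updates_for_person; infer_instance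

def pvWitness_amount_of_insert_and_updates_for_person : Int × List (List Int) × List (List Int) :=
  (1, [[1, 7], [2, 5]], [[4, 0, 1, 9], [6, 0, 1, 9], [3, 0, 2]])

def Spec_amount_of_insert_and_updates_for_person (inventory_person_id : Int) (insert_list : List (List Int)) (update_list : List (List Int)) (out : Int) : Prop := out = amount_of_insert_and_updates_for_person_alt inventory_person_id insert_list update_list
instance (inventory_person_id : Int) (insert_list : List (List Int)) (update_list : List (List Int)) (out : Int) : Decidable (Spec_amount_of_insert_and_updates_for_person inventory_person_id insert_list update_list out) := by unfold Spec_amount_of_insert_and_updates_for_person; infer_instance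

-- ===== CLAIM (what is proved, stated in full; the proofs are below) =====
def Claim_equal_amount_of_insert_and_updates_for_person : Prop := ∀ (inventory_person_id : Int) (insert_list : List (List Int)) (update_list : List (List Int)), Dom_amount_of_insert_and_updates_for_person inventory_person_id insert_list update_list → Pre_amount_of_insert_and_updates_for_person inventory_person_id insert_list update_list → Spec_amount_of_insert_and_updates_for_person inventory_person_id insert_list update_list (amount_of_insert_and_updates_for_person inventory_person_id insert_list update_list)

-- ===== LEMMAS AND PROOFS =====

-- A's loop body, expressed on the (key, value) pairs it actually consumes
def pvStep (d : PySem.Dict Int Int) (p : Int × Int) : PySem.Dict Int Int :=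
  match d.get? p.1 with
  | some w => if w < p.2 then d.insert p.1 p.2 else d
  | none => d.insert p.1 p.2

lemma pvFoldA_eq_foldStep (id : Int) (upd : List (List Int)) (d : PySem.Dict Int Int) :
    upd.foldl (fun d row =>
      if PySem.List.pyGetD row 2 0 = id then
        match d.get? (PySem.List.pyGetD row 3 0) with
        | some w =>
            if w < PySem.List.pyGetD row 0 0 then
              d.insert (PySem.List.pyGetD row 3 0) (PySem.List.pyGetD row 0 0)
            else d
        | none => d.insert (PySem.List.pyGetD row 3 0) (PySem.List.pyGetD row 0 0)
      else d) d
    = ((upd.filter (fun row => PySem.List.pyGetD row 2 0 == id)).map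
        (fun row => (PySem.List.pyGetD row 3 0, PySem.List.pyGetD row 0 0))).foldl pvStep d := by
  induction upd generalizing d with
  | nil => rfl
  | cons r t ih =>
      by_cases h : PySem.List.pyGetD r 2 0 = id
      · simp [h, pvStep, ih]
      · simp [h, ih]

lemma pvStep_get? (d : PySem.Dict Int Int) (p : Int × Int) (k : Int) :
    (pvStep d p).get? k =
      if p.1 = k then
        some (match d.get? k with | some w => max w p.2 | none => p.2)
      else d.get? k := by
  unfold pvStep
  rcases hp : d.get? p.1 with _ | w
  · by_cases hk : p.1 = k
    · subst hk; simp [PySem.Dict.get?_insert_self, hp]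
    · simp [hk, PySem.Dict.get?_insert_of_ne d p.2 (Ne.symm hk)]
  · by_cases hk : p.1 = k
    · subst hk
      by_cases hw : w < p.2
      · simp [hw, PySem.Dict.get?_insert_self, hp, max_eq_right (le_of_lt hw)]
      · simp [hw, hp, max_eq_left (not_lt.mp hw)]
    · by_cases hw : w < p.2
      · simp [hw, hk, PySem.Dict.get?_insert_of_ne d p.2 (Ne.symm hk)]
      · simp [hw, hk]

-- characterisation of the dict after A's first loop, as an optional running max
def pvOMax (o : Option Int) (v : Int) : Option Int :=
  match o with | some w => some (max w v) | none => some v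

lemma pvFoldStep_get? (l : List (Int × Int)) (d : PySem.Dict Int Int) (k : Int) :
    (l.foldl pvStep d).get? k =
      ((l.filter (fun p => p.1 == k)).map (·.2)).foldl pvOMax (d.get? k) := by
  induction l generalizing d with
  | nil => rfl
  | cons p t ih =>
      by_cases h : p.1 = k
      · simp only [List.foldl_cons, ih, List.filter_cons, h, beq_self_eq_true, if_true,
          List.map_cons, pvStep_get? d p k, List.foldl_cons]
        cases d.get? k <;> rfl
      · simp only [List.foldl_cons, ih, List.filter_cons]
        simp [pvStep_get? d p k, h]

lemma pvFoldOMax_some (vs : List Int) (w : Int) :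
    vs.foldl pvOMax (some w) = some (vs.foldl max w) := by
  induction vs generalizing w with
  | nil => rfl
  | cons v t ih => simp [pvOMax, ih]

lemma pvFoldOMax_none (vs : List Int) :
    vs.foldl pvOMax none = vs.max? := by
  cases vs with
  | nil => rfl
  | cons v t =>
      rw [List.max?_cons', List.foldl_cons]
      show t.foldl pvOMax (some v) = _
      rw [pvFoldOMax_some]

lemma pvFoldStep_get?_empty (l : List (Int × Int)) (k : Int) :
    (l.foldl pvStep PySem.Dict.empty).get? k =
      ((l.filter (fun p => p.1 == k)).map (·.2)).max? := by
  rw [pvFoldStep_get?, PySem.Dict.get?_empty, pvFoldOMax_none]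

lemma pvFoldStep_keys (l : List (Int × Int)) (d : PySem.Dict Int Int) :
    (l.foldl pvStep d).keys = PySem.Set.update d.keys (l.map (·.1)) := by
  induction l generalizing d with
  | nil => rfl
  | cons p t ih =>
      simp only [List.foldl_cons, ih, List.map_cons, PySem.Set.update]
      congr 1
      unfold pvStep
      rcases hp : d.get? p.1 with _ | w
      · have hc : d.contains p.1 = false := by
          rw [PySem.Dict.contains_eq_isSome_get?, hp]; rfl
        rw [PySem.Dict.keys_insert_of_not_contains d p.2 hc]
        have hnm : p.1 ∉ d.keys := fun hm => by
          simp [(PySem.Dict.contains_iff_mem_keys d p.1).mpr hm] at hc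
        simp [PySem.Set.add, PySem.Set.contains, List.contains_eq_mem, hnm]
      · have hc : d.contains p.1 = true := by
          rw [PySem.Dict.contains_eq_isSome_get?, hp]; rfl
        have hmem : p.1 ∈ d.keys := (PySem.Dict.contains_iff_mem_keys d p.1).mp hc
        have hadd : PySem.Set.add d.keys p.1 = d.keys := by
          simp [PySem.Set.add, PySem.Set.contains, List.contains_eq_mem, hmem]
        by_cases hw : w < p.2
        · simp [hw, PySem.Dict.keys_insert_of_contains d p.2 hc, hadd]
        · simp [hw, hadd]

lemma pvFoldStep_keys_empty (l : List (Int × Int)) :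
    (l.foldl pvStep PySem.Dict.empty).keys = PySem.Set.ofList (l.map (·.1)) := by
  rw [pvFoldStep_keys]
  rfl

lemma pvCount_eq_filter_length (P : List Int → Bool) (ins : List (List Int)) (c : Int) :
    ins.foldl (fun c row => if P row then c + 1 else c) c
      = c + ((ins.filter P).length : Int) := by
  induction ins generalizing c with
  | nil => simp
  | cons r t ih =>
      by_cases h : P r
      · simp [h, ih]; ring
      · simp [h, ih]

-- ===== VERDICT (by name: the statement is the Claim_ definition above) =====
theorem amount_of_insert_and_updates_for_person_spec : Claim_equal_amount_of_insert_and_updates_for_person := by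
  intro id ins upd _ _
  unfold Spec_amount_of_insert_and_updates_for_person
  unfold amount_of_insert_and_updates_for_person amount_of_insert_and_updates_for_person_alt
  simp only [pvFoldA_eq_foldStep]
  set mine : List (Int × Int) :=
    (upd.filter (fun row => PySem.List.pyGetD row 2 0 == id)).map
      (fun row => (PySem.List.pyGetD row 3 0, PySem.List.pyGetD row 0 0)) with hmine
  set d := mine.foldl pvStep PySem.Dict.empty with hd
  have hkeys : d.keys = PySem.Set.ofList (mine.map (·.1)) := pvFoldStep_keys_empty mine
  have hnd : d.keys.Nodup := by rw [hkeys]; exact PySem.Set.nodup_ofList _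
  have hget : ∀ k, d.get? k = ((mine.filter (fun p => p.1 == k)).map (·.2)).max? :=
    fun k => pvFoldStep_get?_empty mine k
  -- sums of values agree
  have hvals : d.values.sum =
      ((PySem.Set.ofList (mine.map (·.1))).map
        (fun k => (((mine.filter (fun p => p.1 == k)).map (·.2)).max?).getD 0)).sum := by
    rw [PySem.Dict.values_eq_map_keys d hnd 0, hkeys]
    congr 1
    apply List.map_congr_left
    intro k hk
    rw [PySem.Dict.getD_eq_get?_getD, hget k]
  -- insert counters agree
  have hpred : ∀ row : List Int,
      (decide (PySem.List.pyGetD row 0 0 = id ∧ d.get? (PySem.List.pyGetD row 1 0) = none))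
      = (PySem.List.pyGetD row 0 0 == id &&
         !((PySem.Set.ofList (mine.map (·.1))).contains (PySem.List.pyGetD row 1 0))) := by
    intro row
    have hnone : (d.get? (PySem.List.pyGetD row 1 0) = none)
        ↔ PySem.List.pyGetD row 1 0 ∉ PySem.Set.ofList (mine.map (·.1)) := by
      rw [PySem.Dict.get?_eq_none_iff_not_mem_keys, hkeys]
    by_cases h1 : PySem.List.pyGetD row 0 0 = id
    · by_cases h2 : PySem.List.pyGetD row 1 0 ∈ PySem.Set.ofList (mine.map (·.1))
      · simp [h1, h2, hnone, PySem.Set.contains, List.contains_eq_mem]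
      · simp [h1, h2, hnone, PySem.Set.contains, List.contains_eq_mem]
    · simp [h1]
  have hcnt :
      ins.foldl (fun c row =>
        if PySem.List.pyGetD row 0 0 = id ∧ d.get? (PySem.List.pyGetD row 1 0) = none
        then c + 1 else c) 0
      = ((ins.filter (fun row =>
          PySem.List.pyGetD row 0 0 == id &&
          !((PySem.Set.ofList (mine.map (·.1))).contains (PySem.List.pyGetD row 1 0)))).length : Int) := by
    have := pvCount_eq_filter_length (fun row =>
      decide (PySem.List.pyGetD row 0 0 = id ∧ d.get? (PySem.List.pyGetD row 1 0) = none)) ins 0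
    simp only [decide_eq_true_eq] at this
    rw [this]
    simp only [zero_add]
    congr 2
    apply List.filter_congr
    intro row _
    exact hpred row
  rw [hcnt, hvals]
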